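-- pv_equiv track=rewrite | github.com/Intelligent-CAT-Lab/FlakyDoctor | src/repair_OD.py | analyze_surefire_test_result
-- ===== SOURCE A (Python) =====
-- def analyze_surefire_test_result(output):
--     all_test_results = []
--     output_list = output.split("\n")
--     for line in output_list:
--         if "Tests run: 2, Failures: 0, Errors: 0, Skipped: 0" in line:
--             all_test_results.append("test_pass")
--         elif "Tests run: 2, Failures: 1, Errors: 0, Skipped: 0" in line:
--             all_test_results.append("test_failure")
--         elif "Tests run: 2, Failures: 0, Errors: 1, Skipped: 0" in line:
--             all_test_results.append("test_failure")
--         elif "Tests run: 2, Failures: 0, Errors: 2, Skipped: 0" in line\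
--             or "Tests run: 2, Failures: 2, Errors: 0, Skipped: 0" in line:
--             all_test_results.append("test_failure")
--     if len(all_test_results) == 0:
--         if "COMPILATION ERROR" in output:
--             return "compilation_error"
--         elif "BUILD FAILURE" in output:
--             return "build_failure"
--         elif "processing the POMs" in output:
--             return "pom_error"
--         else:
--             return "build_failure"
--     if "test_pass" in all_test_results and "test_failure" not in all_test_results:
--         return "test_pass"
--     else:
--         return "test_failure"
-- ===== SOURCE B (Python) =====
-- PASS = "Tests run: 2, Failures: 0, Errors: 0, Skipped: 0"
-- FAILS = (
--     "Tests run: 2, Failures: 1, Errors: 0, Skipped: 0",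
--     "Tests run: 2, Failures: 0, Errors: 1, Skipped: 0",
--     "Tests run: 2, Failures: 0, Errors: 2, Skipped: 0",
--     "Tests run: 2, Failures: 2, Errors: 0, Skipped: 0",
-- )
--
--
-- def analyze_surefire_test_result(output):
--     lines = output.split("\n")
--     has_pass = any(PASS in line for line in lines)
--     has_fail = any(
--         PASS not in line and any(p in line for p in FAILS) for line in lines
--     )
--     if not has_pass and not has_fail:
--         if "COMPILATION ERROR" in output:
--             return "compilation_error"
--         if "BUILD FAILURE" in output:
--             return "build_failure"
--         if "processing the POMs" in output:
--             return "pom_error"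
--         return "build_failure"
--     return "test_pass" if has_pass and not has_fail else "test_failure"
-- ===== Notes on version B (the rewrite author's own statement) =====
-- stated objective: simpler
-- what changed: B drops A's intermediate result list entirely: instead of appending per-line verdicts and then scanning that list for length and membership, B computes two booleans (has_pass, has_fail) in short-circuiting any() passes and decides from them.
import Mathlib
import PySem

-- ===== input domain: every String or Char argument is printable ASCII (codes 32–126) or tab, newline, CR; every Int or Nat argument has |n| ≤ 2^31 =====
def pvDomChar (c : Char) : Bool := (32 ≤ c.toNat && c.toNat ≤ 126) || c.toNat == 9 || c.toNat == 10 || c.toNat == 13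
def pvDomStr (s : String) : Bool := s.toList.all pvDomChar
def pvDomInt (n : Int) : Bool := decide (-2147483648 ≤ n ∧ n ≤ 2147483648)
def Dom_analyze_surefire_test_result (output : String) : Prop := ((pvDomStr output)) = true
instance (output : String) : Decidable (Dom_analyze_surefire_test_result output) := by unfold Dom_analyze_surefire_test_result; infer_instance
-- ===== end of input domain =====

-- B replaces A's intermediate per-line result list (built then scanned for length/membership)
-- by two booleans computed with short-circuiting any-passes; objective: simpler.


-- ===== PORT A =====
def analyze_surefire_test_result (output : String) : String :=
  let output_list := (PySem.Str.split? output "\n").getD []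
  let all_test_results := output_list.foldl (fun acc line =>
    if PySem.Str.isIn "Tests run: 2, Failures: 0, Errors: 0, Skipped: 0" line then
      acc ++ ["test_pass"]
    else if PySem.Str.isIn "Tests run: 2, Failures: 1, Errors: 0, Skipped: 0" line then
      acc ++ ["test_failure"]
    else if PySem.Str.isIn "Tests run: 2, Failures: 0, Errors: 1, Skipped: 0" line then
      acc ++ ["test_failure"]
    else if PySem.Str.isIn "Tests run: 2, Failures: 0, Errors: 2, Skipped: 0" line
        || PySem.Str.isIn "Tests run: 2, Failures: 2, Errors: 0, Skipped: 0" line then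
      acc ++ ["test_failure"]
    else acc) []
  if all_test_results.length == 0 then
    if PySem.Str.isIn "COMPILATION ERROR" output then "compilation_error"
    else if PySem.Str.isIn "BUILD FAILURE" output then "build_failure"
    else if PySem.Str.isIn "processing the POMs" output then "pom_error"
    else "build_failure"
  else if all_test_results.contains "test_pass" && !(all_test_results.contains "test_failure") then
    "test_pass"
  else
    "test_failure"

-- ===== PORT B =====
def pvPASS : String := "Tests run: 2, Failures: 0, Errors: 0, Skipped: 0"
def pvFAILS : List String :=
  [ "Tests run: 2, Failures: 1, Errors: 0, Skipped: 0"
  , "Tests run: 2, Failures: 0, Errors: 1, Skipped: 0"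
  , "Tests run: 2, Failures: 0, Errors: 2, Skipped: 0"
  , "Tests run: 2, Failures: 2, Errors: 0, Skipped: 0" ]

def analyze_surefire_test_result_alt (output : String) : String :=
  let lines := (PySem.Str.split? output "\n").getD []
  let has_pass := lines.any (fun line => PySem.Str.isIn pvPASS line)
  let has_fail := lines.any (fun line =>
    !PySem.Str.isIn pvPASS line && pvFAILS.any (fun p => PySem.Str.isIn p line))
  if !has_pass && !has_fail then
    if PySem.Str.isIn "COMPILATION ERROR" output then "compilation_error"
    else if PySem.Str.isIn "BUILD FAILURE" output then "build_failure"
    else if PySem.Str.isIn "processing the POMs" output then "pom_error"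
    else "build_failure"
  else if has_pass && !has_fail then "test_pass" else "test_failure"

-- ===== PRECONDITION & SPEC =====
def Spec_analyze_surefire_test_result (output : String) (out : String) : Prop := out = analyze_surefire_test_result_alt output
instance (output : String) (out : String) : Decidable (Spec_analyze_surefire_test_result output out) := by unfold Spec_analyze_surefire_test_result; infer_instance

-- ===== CLAIM (what is proved, stated in full; the proofs are below) =====
def Claim_equal_analyze_surefire_test_result : Prop := ∀ (output : String), Dom_analyze_surefire_test_result output → Spec_analyze_surefire_test_result output (analyze_surefire_test_result output)

-- ===== LEMMAS AND PROOFS =====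

-- per-line verdict of A's loop body, as a (0- or 1-element) list
def pvLineRes (line : String) : List String :=
  if PySem.Str.isIn "Tests run: 2, Failures: 0, Errors: 0, Skipped: 0" line then ["test_pass"]
  else if PySem.Str.isIn "Tests run: 2, Failures: 1, Errors: 0, Skipped: 0" line then ["test_failure"]
  else if PySem.Str.isIn "Tests run: 2, Failures: 0, Errors: 1, Skipped: 0" line then ["test_failure"]
  else if PySem.Str.isIn "Tests run: 2, Failures: 0, Errors: 2, Skipped: 0" line
      || PySem.Str.isIn "Tests run: 2, Failures: 2, Errors: 0, Skipped: 0" line then ["test_failure"]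
  else []

theorem pvFoldl_eq_flatMap (lines : List String) (acc : List String) :
    lines.foldl (fun acc line =>
      if PySem.Str.isIn "Tests run: 2, Failures: 0, Errors: 0, Skipped: 0" line then
        acc ++ ["test_pass"]
      else if PySem.Str.isIn "Tests run: 2, Failures: 1, Errors: 0, Skipped: 0" line then
        acc ++ ["test_failure"]
      else if PySem.Str.isIn "Tests run: 2, Failures: 0, Errors: 1, Skipped: 0" line then
        acc ++ ["test_failure"]
      else if PySem.Str.isIn "Tests run: 2, Failures: 0, Errors: 2, Skipped: 0" line
          || PySem.Str.isIn "Tests run: 2, Failures: 2, Errors: 0, Skipped: 0" line then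
        acc ++ ["test_failure"]
      else acc) acc = acc ++ lines.flatMap pvLineRes := by
  induction lines generalizing acc with
  | nil => simp
  | cons l t ih =>
    simp only [List.foldl_cons, List.flatMap_cons, ih]
    have hb : (if PySem.Str.isIn "Tests run: 2, Failures: 0, Errors: 0, Skipped: 0" l then
        acc ++ ["test_pass"]
      else if PySem.Str.isIn "Tests run: 2, Failures: 1, Errors: 0, Skipped: 0" l then
        acc ++ ["test_failure"]
      else if PySem.Str.isIn "Tests run: 2, Failures: 0, Errors: 1, Skipped: 0" l then
        acc ++ ["test_failure"]
      else if PySem.Str.isIn "Tests run: 2, Failures: 0, Errors: 2, Skipped: 0" l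
          || PySem.Str.isIn "Tests run: 2, Failures: 2, Errors: 0, Skipped: 0" l then
        acc ++ ["test_failure"]
      else acc) = acc ++ pvLineRes l := by
      simp only [pvLineRes]; split_ifs <;> simp
    rw [hb, List.append_assoc]

-- bool of the pass test / of B's fail test, per line
def pvPassP (line : String) : Bool := PySem.Str.isIn pvPASS line
def pvFailP (line : String) : Bool :=
  !PySem.Str.isIn pvPASS line && pvFAILS.any (fun p => PySem.Str.isIn p line)

theorem pvLineRes_char (line : String) :
    ("test_pass" ∈ pvLineRes line ↔ pvPassP line = true) ∧
    ("test_failure" ∈ pvLineRes line ↔ pvFailP line = true) ∧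
    (pvLineRes line = [] ↔ (pvPassP line = false ∧ pvFailP line = false)) := by
  simp only [pvLineRes, pvPassP, pvFailP, pvPASS, pvFAILS]
  split_ifs with h1 h2 h3 h4 <;> simp_all
  rcases h4 with h | h <;> simp_all

theorem pvContains_pass (lines : List String) :
    (lines.flatMap pvLineRes).contains "test_pass" =
      lines.any (fun line => PySem.Str.isIn pvPASS line) := by
  rw [List.contains_eq_mem]
  apply Bool.eq_iff_iff.mpr
  simp only [decide_eq_true_eq, List.mem_flatMap, List.any_eq_true]
  constructor
  · rintro ⟨l, hm, hr⟩; exact ⟨l, hm, (pvLineRes_char l).1.mp hr⟩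
  · rintro ⟨l, hm, hr⟩; exact ⟨l, hm, (pvLineRes_char l).1.mpr hr⟩

theorem pvContains_fail (lines : List String) :
    (lines.flatMap pvLineRes).contains "test_failure" =
      lines.any (fun line =>
        !PySem.Str.isIn pvPASS line && pvFAILS.any (fun p => PySem.Str.isIn p line)) := by
  rw [List.contains_eq_mem]
  apply Bool.eq_iff_iff.mpr
  simp only [decide_eq_true_eq, List.mem_flatMap, List.any_eq_true]
  constructor
  · rintro ⟨l, hm, hr⟩; exact ⟨l, hm, (pvLineRes_char l).2.1.mp hr⟩
  · rintro ⟨l, hm, hr⟩; exact ⟨l, hm, (pvLineRes_char l).2.1.mpr hr⟩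

theorem pvLen_zero (lines : List String) :
    ((lines.flatMap pvLineRes).length == 0) =
      (!lines.any (fun line => PySem.Str.isIn pvPASS line) &&
       !lines.any (fun line =>
        !PySem.Str.isIn pvPASS line && pvFAILS.any (fun p => PySem.Str.isIn p line))) := by
  apply Bool.eq_iff_iff.mpr
  simp only [beq_iff_eq, List.length_eq_zero_iff, List.flatMap_eq_nil_iff,
    Bool.and_eq_true, Bool.not_eq_true', List.any_eq_false]
  constructor
  · intro h
    constructor
    · intro l hm
      have := ((pvLineRes_char l).2.2.mp (h l hm)).1
      simpa [pvPassP] using this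
    · intro l hm
      have := ((pvLineRes_char l).2.2.mp (h l hm)).2
      simpa [pvFailP] using this
  · rintro ⟨h1, h2⟩ l hm
    exact (pvLineRes_char l).2.2.mpr
      ⟨by simpa [pvPassP] using h1 l hm, by simpa [pvFailP] using h2 l hm⟩

theorem analyze_surefire_test_result_eq (output : String) :
    analyze_surefire_test_result output = analyze_surefire_test_result_alt output := by
  simp only [analyze_surefire_test_result, analyze_surefire_test_result_alt]
  rw [pvFoldl_eq_flatMap, List.nil_append, pvContains_pass, pvContains_fail, pvLen_zero]

-- ===== VERDICT (by name: the statement is the Claim_ definition above) =====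
theorem analyze_surefire_test_result_spec : Claim_equal_analyze_surefire_test_result := by
  intro output _
  unfold Spec_analyze_surefire_test_result
  exact analyze_surefire_test_result_eq output
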